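-- pv_equiv track=rewrite | github.com/sunny-ops/Amazon_OA | Count Number of Retailers.py | countNumberOfRetailers
-- ===== SOURCE A (Python) =====
-- import bisect
--
-- def countNumberOfRetailers(retailers, requests):
--   n = len(retailers)
--   sorted_x = sorted([x for x, y in retailers])
--   sorted_y = sorted([y for x, y in retailers])
--   ans = []
--   for x, y in requests:
--     ans.append(min(n - bisect.bisect_left(sorted_x, x), n - bisect.bisect_left(sorted_y, y)))
--   return ans
-- ===== SOURCE B (Python) =====
-- def countNumberOfRetailers(retailers, requests):
--   ans = []
--   for x, y in requests:
--     cx = sum(1 for rx, ry in retailers if rx >= x)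
--     cy = sum(1 for rx, ry in retailers if ry >= y)
--     ans.append(min(cx, cy))
--   return ans
-- ===== Notes on version B (the rewrite author's own statement) =====
-- stated objective: simpler
-- what changed: Replaced the two sorted copies plus binary searches by a direct per-request linear count of retailers with coordinate >= the threshold, taking the min of the two counts.
import Mathlib
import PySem

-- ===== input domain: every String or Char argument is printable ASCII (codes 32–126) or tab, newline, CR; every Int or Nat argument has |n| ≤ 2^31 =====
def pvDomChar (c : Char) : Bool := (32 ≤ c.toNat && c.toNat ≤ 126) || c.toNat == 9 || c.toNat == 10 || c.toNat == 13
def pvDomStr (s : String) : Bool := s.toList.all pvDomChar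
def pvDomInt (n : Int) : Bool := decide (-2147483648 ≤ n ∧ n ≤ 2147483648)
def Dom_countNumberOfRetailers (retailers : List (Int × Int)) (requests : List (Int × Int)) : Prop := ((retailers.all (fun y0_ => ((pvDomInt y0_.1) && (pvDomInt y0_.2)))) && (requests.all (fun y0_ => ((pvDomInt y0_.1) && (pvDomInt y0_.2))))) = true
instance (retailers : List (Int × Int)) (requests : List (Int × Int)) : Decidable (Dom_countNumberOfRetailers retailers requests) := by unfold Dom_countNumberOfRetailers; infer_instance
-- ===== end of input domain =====

-- B replaces A's sort + binary-search counting by a direct per-request linear count (simpler, no sorting).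


-- ===== PORT A =====
def countNumberOfRetailers (retailers : List (Int × Int)) (requests : List (Int × Int)) : List Int :=
  let n : Int := retailers.length
  let sorted_x := PySem.List.sorted (retailers.map (fun p => p.1)) (fun v => v) false
  let sorted_y := PySem.List.sorted (retailers.map (fun p => p.2)) (fun v => v) false
  requests.foldl (fun ans q =>
    ans ++ [min (n - (PySem.List.bisectLeft sorted_x q.1 : Int))
                (n - (PySem.List.bisectLeft sorted_y q.2 : Int))]) []

-- ===== PORT B =====
def countNumberOfRetailers_alt (retailers : List (Int × Int)) (requests : List (Int × Int)) : List Int :=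
  requests.foldl (fun ans q =>
    let cx : Int := (retailers.countP (fun r => q.1 ≤ r.1) : Int)
    let cy : Int := (retailers.countP (fun r => q.2 ≤ r.2) : Int)
    ans ++ [min cx cy]) []

-- ===== PRECONDITION & SPEC =====
def Spec_countNumberOfRetailers (retailers : List (Int × Int)) (requests : List (Int × Int)) (out : List Int) : Prop := out = countNumberOfRetailers_alt retailers requests
instance (retailers : List (Int × Int)) (requests : List (Int × Int)) (out : List Int) : Decidable (Spec_countNumberOfRetailers retailers requests out) := by unfold Spec_countNumberOfRetailers; infer_instance

-- ===== CLAIM (what is proved, stated in full; the proofs are below) =====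
def Claim_equal_countNumberOfRetailers : Prop := ∀ (retailers : List (Int × Int)) (requests : List (Int × Int)), Dom_countNumberOfRetailers retailers requests → Spec_countNumberOfRetailers retailers requests (countNumberOfRetailers retailers requests)

-- ===== LEMMAS AND PROOFS =====

-- On a nondecreasing Int list, the count of elements ≥ x is length - bisectLeft.
lemma countP_ge_eq_sub_bisectLeft (s : List Int) (x : Int)
    (hs : List.Pairwise (fun a b => a ≤ b) s) :
    s.countP (fun a => x ≤ a) = s.length - PySem.List.bisectLeft s x := by
  obtain ⟨hk, hlt, hge⟩ := PySem.List.bisectLeft_spec s x hs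
  set k := PySem.List.bisectLeft s x with hkdef
  conv_lhs => rw [← List.take_append_drop k s]
  rw [List.countP_append]
  have h1 : (s.take k).countP (fun a => x ≤ a) = 0 := by
    apply List.countP_eq_zero.2
    intro a ha
    obtain ⟨j, hj, rfl⟩ := List.mem_iff_getElem.mp ha
    have hjs : j < s.length := by
      have := hj; simp [List.length_take] at this; omega
    have hjk : j < k := by
      have := hj; simp [List.length_take] at this; omega
    have := hlt j hjs hjk
    simp only [List.getElem_take]
    simp only [decide_eq_true_eq]
    omega
  have h2 : (s.drop k).countP (fun a => x ≤ a) = (s.drop k).length := by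
    apply List.countP_eq_length.2
    intro a ha
    obtain ⟨j, hj, rfl⟩ := List.mem_iff_getElem.mp ha
    have hjs : k + j < s.length := by
      have := hj; simp [List.length_drop] at this; omega
    have := hge (k + j) hjs (Nat.le_add_right k j)
    simp only [List.getElem_drop]
    simp only [decide_eq_true_eq]
    omega
  rw [h1, h2, List.length_drop]
  omega

-- For one request coordinate: A's (n - bisectLeft(sorted proj, t)) equals B's count of retailers with proj ≥ t.
lemma bisect_count_agree (l : List Int) (t : Int) :
    (l.length : Int) - (PySem.List.bisectLeft (PySem.List.sorted l (fun v => v) false) t : Int)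
      = (l.countP (fun a => t ≤ a) : Int) := by
  set s := PySem.List.sorted l (fun v => v) false with hsdef
  have hperm : s.Perm l := PySem.List.sorted_perm l (fun v => v) false
  have hpw : List.Pairwise (fun a b => a ≤ b) s := PySem.List.sorted_pairwise l (fun v => v)
  have hcount : s.countP (fun a => t ≤ a) = l.countP (fun a => t ≤ a) := hperm.countP_eq _
  have hlen : s.length = l.length := hperm.length_eq
  have hmain := countP_ge_eq_sub_bisectLeft s t hpw
  obtain ⟨hk, -, -⟩ := PySem.List.bisectLeft_spec s t hpw
  omega

-- foldl-append builds a map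
lemma foldl_append_singleton {α β : Type} (f : α → β) (l : List α) (acc : List β) :
    l.foldl (fun a x => a ++ [f x]) acc = acc ++ l.map f := by
  induction l generalizing acc with
  | nil => simp
  | cons h t ih => simp [List.foldl, ih]

-- ===== VERDICT (by name: the statement is the Claim_ definition above) =====
theorem countNumberOfRetailers_spec : Claim_equal_countNumberOfRetailers := by
  intro retailers requests _
  unfold Spec_countNumberOfRetailers countNumberOfRetailers countNumberOfRetailers_alt
  simp only
  rw [foldl_append_singleton, foldl_append_singleton]
  simp only [List.nil_append]
  apply List.map_congr_left
  intro q _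
  have hx := bisect_count_agree (retailers.map (fun p => p.1)) q.1
  have hy := bisect_count_agree (retailers.map (fun p => p.2)) q.2
  simp only [List.length_map, List.countP_map, Function.comp_def] at hx hy
  rw [hx, hy]
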